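-- pv_equiv track=rewrite | github.com/roque-brito/ICC-USP-Coursera | icc_pt2/week2/exercicio_ordenacao.py | nome_mais_curto
-- ===== SOURCE A (Python) =====
-- def formata(lista):
--     ''' ========================================================================================
--     Essa função formata a lista: extrai espaços vazios e formata a primeira letra para maiúscula.
--     Entrada: lista de strings
--     Saída: lista de strings
--     ========================================================================================'''
--     lista_formatada = []
--     for i in range(len(lista)):
--         nome = str(lista[i]).strip().capitalize()
--         l = len(nome)
--         lista_formatada.append(nome)
--
--     return lista_formatada
--
-- def nome_mais_curto(lista0):
--     ''' ========================================================================================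
--     Essa função cria uma nova lista com os tamanhos de cada nome; encontra o valor mínimo e busca
--     o índice desse valor mínimo na lista principal (ja formatada); a seguir, ela imprime o nome
--     associado ao índice do nome mais curto.
--     Entada: lista formatada
--     Saída: string com nome mais curto
--     ========================================================================================'''
--     lista = formata(lista0)
--     lista1 = []
--     for i in range(len(lista)):
--         nome = lista[i]
--         tam_nome = len(nome)
--         lista1.append(tam_nome)
--     m = min(lista1)
--     n = lista1.index(m)
--     mais_curto = lista[n]
--
--     return mais_curto
-- ===== SOURCE B (Python) =====
-- def nome_mais_curto(lista0):
--     # same formatting as A (str -> strip -> capitalize), then a single keyed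
--     # min pass: first element of minimal length, no length table, no .index.
--     return min((str(nome).strip().capitalize() for nome in lista0), key=len)
-- ===== Notes on version B (the rewrite author's own statement) =====
-- stated objective: simpler
-- what changed: Replaced A's three phases (build a formatted list, build a parallel list of lengths, min + .index + lookup) by a single keyed pass min(generator, key=len), which returns the first formatted name of minimal length directly.
import Mathlib
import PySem

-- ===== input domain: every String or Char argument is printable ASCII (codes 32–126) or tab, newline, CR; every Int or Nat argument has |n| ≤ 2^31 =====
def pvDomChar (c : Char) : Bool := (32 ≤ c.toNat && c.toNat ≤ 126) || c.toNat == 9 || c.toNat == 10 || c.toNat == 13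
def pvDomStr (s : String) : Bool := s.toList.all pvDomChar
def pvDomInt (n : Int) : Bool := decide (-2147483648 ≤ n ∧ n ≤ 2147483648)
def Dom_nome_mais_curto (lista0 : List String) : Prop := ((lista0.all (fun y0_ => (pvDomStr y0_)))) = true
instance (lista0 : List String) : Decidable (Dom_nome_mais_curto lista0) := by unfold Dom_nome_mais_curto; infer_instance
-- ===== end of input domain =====

-- B replaces A's three phases (formatted list, parallel length list, min + .index + lookup)
-- by one keyed min pass over the formatted names; same return value, simpler decomposition.

-- ===== PORT A =====
-- str.capitalize() ported by hand (no PySem primitive): first char uppercased, the rest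
-- lowered — exact on the ASCII domain, where Python's titlecase of a char = its uppercase.
def pvCapitalize (s : String) : String :=
  match s.toList with
  | [] => ""
  | c :: rest => String.ofList (PySem.Chars.upper [c] ++ PySem.Chars.lower rest)

-- nome = str(lista[i]).strip().capitalize()  (str() on a str is the identity)
def pvFmt (s : String) : String := pvCapitalize (PySem.Str.strip s)

def formata (lista : List String) : List String :=
  lista.foldl (fun acc s => acc ++ [pvFmt s]) []

def nome_mais_curto (lista0 : List String) : String :=
  let lista := formata lista0
  let lista1 := lista.foldl (fun acc nome => acc ++ [PySem.Str.len nome]) []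
  match PySem.List.min? lista1 (fun x => x) with
  | none => ""      -- min([]) raises ValueError: excluded by Pre_
  | some m =>
    match PySem.List.index? lista1 m with
    | none => ""    -- unreachable: m is a member of lista1
    | some n => (PySem.List.pyGet? lista (n : Int)).getD ""

-- ===== PORT B =====
def nome_mais_curto_alt (lista0 : List String) : String :=
  (PySem.List.min? (lista0.map pvFmt) PySem.Str.len).getD ""
  -- min(generator, key=len); on [] Python raises ValueError: excluded by Pre_

-- ===== PRECONDITION & SPEC =====
-- Pre_ excludes only the empty list, on which both Pythons raise ValueError (min of empty sequence).
def Pre_nome_mais_curto (lista0 : List String) : Prop := lista0 ≠ []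
instance (lista0 : List String) : Decidable (Pre_nome_mais_curto lista0) := by unfold Pre_nome_mais_curto; infer_instance
def pvWitness_nome_mais_curto : List String := ["  ana ", "JOAO"]

def Spec_nome_mais_curto (lista0 : List String) (out : String) : Prop := out = nome_mais_curto_alt lista0
instance (lista0 : List String) (out : String) : Decidable (Spec_nome_mais_curto lista0 out) := by unfold Spec_nome_mais_curto; infer_instance

-- ===== CLAIM (what is proved, stated in full; the proofs are below) =====
def Claim_equal_nome_mais_curto : Prop := ∀ (lista0 : List String), Dom_nome_mais_curto lista0 → Pre_nome_mais_curto lista0 → Spec_nome_mais_curto lista0 (nome_mais_curto lista0)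

-- ===== LEMMAS AND PROOFS =====

-- first element of minimal key of (x :: t), as a plain left fold without options
def firstMin {α κ : Type} [LT κ] [DecidableLT κ] (key : α → κ) : α → List α → α
  | x, [] => x
  | x, y :: t => firstMin key (if key y < key x then y else x) t

theorem min?_cons {α κ : Type} [LT κ] [DecidableLT κ] (key : α → κ) (x : α) (t : List α) :
    PySem.List.min? (x :: t) key = some (firstMin key x t) := by
  show List.foldl _ (some x) t = _
  induction t generalizing x with
  | nil => rfl
  | cons y t ih =>
    simp only [List.foldl, firstMin]
    split_ifs with h <;> simp [ih]

theorem foldl_append_map {α β : Type} (f : α → β) :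
    ∀ (xs : List α) (acc : List β), xs.foldl (fun a s => a ++ [f s]) acc = acc ++ xs.map f := by
  intro xs
  induction xs with
  | nil => simp
  | cons x t ih => intro acc; simp [List.foldl, ih]

theorem map_firstMin : ∀ (t : List String) (z : String),
    firstMin (fun x => x) (PySem.Str.len z) (t.map PySem.Str.len) = PySem.Str.len (firstMin PySem.Str.len z t) := by
  intro t
  induction t with
  | nil => intro z; rfl
  | cons y t ih =>
    intro z
    simp only [List.map, firstMin]
    split_ifs with h
    · exact ih y
    · exact ih z

theorem FM_le : ∀ (t : List String) (z : String),
    PySem.Str.len (firstMin PySem.Str.len z t) ≤ PySem.Str.len z := by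
  intro t
  induction t with
  | nil => intro z; exact le_refl _
  | cons y t ih =>
    intro z
    simp only [firstMin]
    split_ifs with h
    · exact le_trans (ih y) (le_of_lt h)
    · exact ih z

theorem FM_eq_or_lt : ∀ (t : List String) (z : String),
    firstMin PySem.Str.len z t = z ∨ PySem.Str.len (firstMin PySem.Str.len z t) < PySem.Str.len z := by
  intro t
  induction t with
  | nil => intro z; exact Or.inl rfl
  | cons y t ih =>
    intro z
    simp only [firstMin]
    split_ifs with h
    · right
      rcases ih y with h1 | h1
      · rw [h1]; exact h
      · exact lt_trans h1 h
    · exact ih z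

-- firstMin is the FIRST element of minimal key: find? on "has the minimal length" returns it
theorem key_first : ∀ (t : List String) (z : String),
    List.find? (fun w => PySem.Str.len w == PySem.Str.len (firstMin PySem.Str.len z t)) (z :: t)
      = some (firstMin PySem.Str.len z t) := by
  intro t
  induction t with
  | nil => intro z; simp [firstMin]
  | cons y t ih =>
    intro z
    simp only [firstMin]
    split_ifs with h
    · have hr : PySem.Str.len (firstMin PySem.Str.len y t) < PySem.Str.len z :=
        lt_of_le_of_lt (FM_le t y) h
      rw [List.find?_cons_of_neg, ih y]
      simp only [beq_iff_eq]; omega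
    · rcases FM_eq_or_lt t z with h1 | h1
      · rw [h1, List.find?_cons_of_pos]
        simp
      · have hy : PySem.Str.len (firstMin PySem.Str.len z t) < PySem.Str.len y :=
          lt_of_lt_of_le h1 (not_lt.mp h)
        rw [List.find?_cons_of_neg, List.find?_cons_of_neg]
        · have := ih z
          rw [List.find?_cons_of_neg] at this
          · exact this
          · simp only [beq_iff_eq]; omega
        · simp only [beq_iff_eq]; omega
        · simp only [beq_iff_eq]; omega

theorem findIdx?_get {α : Type} (p : α → Bool) :
    ∀ (l : List α) (r : α), l.find? p = some r → ∃ n, l.findIdx? p = some n ∧ l[n]? = some r := by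
  intro l
  induction l with
  | nil => intro r h; simp at h
  | cons a l ih =>
    intro r h
    by_cases hp : p a
    · rw [List.find?_cons_of_pos hp] at h
      have ha : a = r := by simpa using h
      exact ⟨0, by simp [List.findIdx?_cons, hp], by simp [ha]⟩
    · rw [List.find?_cons_of_neg (by simpa using hp)] at h
      obtain ⟨n, hn, hg⟩ := ih r h
      refine ⟨n + 1, ?_, by simpa using hg⟩
      simp [List.findIdx?_cons, hp, hn]

-- A's min/index/lookup phase over an abstract nonempty list equals B's keyed min
theorem core (z : String) (t : List String) :
    (match PySem.List.min? ((z :: t).map PySem.Str.len) (fun x => x) with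
     | none => ""
     | some m =>
       match PySem.List.index? ((z :: t).map PySem.Str.len) m with
       | none => ""
       | some n => (PySem.List.pyGet? (z :: t) (n : Int)).getD "")
    = (PySem.List.min? (z :: t) PySem.Str.len).getD "" := by
  have hmin : PySem.List.min? ((z :: t).map PySem.Str.len) (fun x => x)
      = some (PySem.Str.len (firstMin PySem.Str.len z t)) := by
    rw [List.map_cons, min?_cons, map_firstMin t z]
  obtain ⟨n, hn, hg⟩ := findIdx?_get _ _ _ (key_first t z)
  have hidx : PySem.List.index? ((z :: t).map PySem.Str.len)
      (PySem.Str.len (firstMin PySem.Str.len z t)) = some n := by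
    show List.findIdx? (fun x => x == PySem.Str.len (firstMin PySem.Str.len z t))
        ((z :: t).map PySem.Str.len) = some n
    rw [List.findIdx?_map]
    exact hn
  simp only [hmin, hidx, min?_cons, PySem.List.pyGet?_natCast, hg, Option.getD_some]

theorem main_eq (lista0 : List String) (h : lista0 ≠ []) :
    nome_mais_curto lista0 = nome_mais_curto_alt lista0 := by
  obtain ⟨a, l, rfl⟩ := List.exists_cons_of_ne_nil h
  have h1 : formata (a :: l) = pvFmt a :: l.map pvFmt := by
    unfold formata
    rw [foldl_append_map, List.nil_append, List.map_cons]
  have h2 : ∀ (z : String) (t : List String),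
      (z :: t).foldl (fun acc nome => acc ++ [PySem.Str.len nome]) []
        = (z :: t).map PySem.Str.len := by
    intro z t
    rw [foldl_append_map, List.nil_append]
  simp only [nome_mais_curto, nome_mais_curto_alt, h1, h2, List.map_cons]
  exact core (pvFmt a) (l.map pvFmt)

-- ===== VERDICT (by name: the statement is the Claim_ definition above) =====
theorem nome_mais_curto_spec : Claim_equal_nome_mais_curto := by
  intro lista0 _ hpre
  exact main_eq lista0 hpre
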